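-- pv_equiv track=rewrite | github.com/NguyenThiHaAnh/gt2025 | TP2.py | find_weakly_connected_components
-- ===== SOURCE A (Python) =====
-- from collections import defaultdict, deque
--
-- def convert_to_undirected(graph):
--     undirected = defaultdict(set)
--     for node, neighbors in graph.items():
--         for neighbor in neighbors:
--             undirected[node].add(neighbor)
--             undirected[neighbor].add(node)
--     return undirected
--
-- def bfs(graph, start, visited):
--     queue = deque([start])
--     visited.add(start)
--     while queue:
--         node = queue.popleft()
--         for neighbor in graph[node]:
--             if neighbor not in visited:
--                 visited.add(neighbor)
--                 queue.append(neighbor)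
--
-- def find_weakly_connected_components(graph, n):
--     undirected_graph = convert_to_undirected(graph)
--     visited = set()
--     components = 0
--     for node in range(1, n + 1):
--         if node not in visited:
--             bfs(undirected_graph, node, visited)
--             components += 1
--     return components
-- ===== SOURCE B (Python) =====
-- def find_weakly_connected_components(graph, n):
--     # Edge-list saturation instead of BFS: no adjacency structure, no queue.
--     edges = [(u, v) for u, nbrs in graph.items() for v in nbrs]
--     visited = set()
--     count = 0
--     for i in range(1, n + 1):
--         if i not in visited:
--             comp = {i}
--             changed = True
--             while changed:
--                 changed = False
--                 for u, v in edges: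
--                     if u in comp and v not in comp:
--                         comp.add(v)
--                         changed = True
--                     elif v in comp and u not in comp:
--                         comp.add(u)
--                         changed = True
--             visited |= comp
--             count += 1
--     return count
-- ===== Notes on version B (the rewrite author's own statement) =====
-- stated objective: alternative
-- what changed: Replaces A's adjacency-dict construction plus queue-based BFS per start node with a plain undirected edge list and a fixed-point saturation (repeatedly relaxing edges until the component set stops growing), keeping only the shared visited set and counter.
import Mathlib
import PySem

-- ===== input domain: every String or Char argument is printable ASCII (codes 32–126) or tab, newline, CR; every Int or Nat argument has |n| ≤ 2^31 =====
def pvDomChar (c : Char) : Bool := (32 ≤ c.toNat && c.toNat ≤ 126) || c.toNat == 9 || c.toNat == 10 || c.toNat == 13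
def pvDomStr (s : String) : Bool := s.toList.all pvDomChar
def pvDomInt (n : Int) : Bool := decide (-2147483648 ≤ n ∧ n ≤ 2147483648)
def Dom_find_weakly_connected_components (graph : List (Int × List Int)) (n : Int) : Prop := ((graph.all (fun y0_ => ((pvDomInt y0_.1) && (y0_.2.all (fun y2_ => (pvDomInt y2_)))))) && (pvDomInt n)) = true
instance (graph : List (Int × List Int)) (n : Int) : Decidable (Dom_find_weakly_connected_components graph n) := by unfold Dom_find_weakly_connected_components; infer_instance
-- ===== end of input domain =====

-- B replaces A's adjacency-dict + per-start BFS queue by an undirected edge list saturated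
-- to a fixed point per component (an 'alternative' decomposition, not claimed faster).
-- The growing 'visited' sets (Python hash sets, consumed order-independently: membership,
-- insertion and the final count only) are ported as Std.HashSet Int.

-- ===== PORT A =====
-- A's Python argument is a dict; the List (Int × List Int) is normalised once with
-- PySem.Dict.ofList (Python dict semantics for duplicate keys), then items() is iterated.

-- undirected[node].add(neighbor); undirected[neighbor].add(node)  (defaultdict(set))
def pvAddEdge (d : PySem.Dict Int (PySem.Set Int)) (u v : Int) : PySem.Dict Int (PySem.Set Int) :=
  let d1 := d.insert u (PySem.Set.add (d.getD u PySem.Set.empty) v)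
  d1.insert v (PySem.Set.add (d1.getD v PySem.Set.empty) u)

-- convert_to_undirected
def pvConvert (gl : List (Int × List Int)) : PySem.Dict Int (PySem.Set Int) :=
  gl.foldl (fun d p => p.2.foldl (fun d nb => pvAddEdge d p.1 nb) d) PySem.Dict.empty

-- bfs: while queue: node = popleft(); for neighbor in graph[node]: if unseen, mark + enqueue.
-- Fuel is a totality guard only (proved sufficient below); `graph[node]` on the defaultdict is
-- ported as getD with the empty set (the defaultdict's insertion of a default entry never changes
-- a later lookup's value).  The neighbour set is consumed only into a visited set and a queue on
-- whose order the returned value does not depend.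
def pvBfs (g : PySem.Dict Int (PySem.Set Int)) : Nat → List Int → Std.HashSet Int → Std.HashSet Int
  | 0, _, V => V
  | _ + 1, [], V => V
  | f + 1, node :: q, V =>
    let st := (PySem.Dict.getD g node PySem.Set.empty).foldl
      (fun (st : Std.HashSet Int × List Int) nb =>
        if st.1.contains nb then st else (st.1.insert nb, st.2 ++ [nb]))
      (V, q)
    pvBfs g f st.2 st.1

-- fuel bound: more than the number of (non-distinct) node occurrences in the dict
def pvFuelA (gl : List (Int × List Int)) : Nat :=
  (gl.flatMap (fun p => p.1 :: p.2)).length + 1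

def find_weakly_connected_components (graph : List (Int × List Int)) (n : Int) : Int :=
  let gl := (PySem.Dict.ofList graph).items
  ((PySem.List.pyRange 1 (n + 1) 1).foldl
    (fun (st : Std.HashSet Int × Int) node =>
      if st.1.contains node then st
      else (pvBfs (pvConvert gl) (pvFuelA gl) [node] (st.1.insert node), st.2 + 1))
    ((∅ : Std.HashSet Int), 0)).2

-- ===== PORT B =====
-- edges = [(u, v) for u, nbrs in graph.items() for v in nbrs]
def pvEdges (gl : List (Int × List Int)) : List (Int × Int) :=
  gl.flatMap (fun p => p.2.map (fun v => (p.1, v)))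

-- one pass of the inner 'for u, v in edges' loop, returning (comp, changed)
def pvPass (edges : List (Int × Int)) (c : PySem.Set Int) : PySem.Set Int × Bool :=
  edges.foldl
    (fun (st : PySem.Set Int × Bool) e =>
      if PySem.Set.contains st.1 e.1 && !PySem.Set.contains st.1 e.2 then
        (PySem.Set.add st.1 e.2, true)
      else if PySem.Set.contains st.1 e.2 && !PySem.Set.contains st.1 e.1 then
        (PySem.Set.add st.1 e.1, true)
      else st)
    (c, false)

-- while changed: run passes; fuel is a totality guard only (proved sufficient below)
def pvSat (edges : List (Int × Int)) : Nat → PySem.Set Int → PySem.Set Int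
  | 0, c => c
  | f + 1, c =>
    let r := pvPass edges c
    if r.2 then pvSat edges f r.1 else r.1

def find_weakly_connected_components_alt (graph : List (Int × List Int)) (n : Int) : Int :=
  let edges := pvEdges (PySem.Dict.ofList graph).items
  ((PySem.List.pyRange 1 (n + 1) 1).foldl
    (fun (st : Std.HashSet Int × Int) i =>
      if st.1.contains i then st
      else ((pvSat edges (2 * edges.length + 2) (PySem.Set.add PySem.Set.empty i)).foldl
        (fun v x => v.insert x) st.1, st.2 + 1))
    ((∅ : Std.HashSet Int), 0)).2

-- ===== PRECONDITION & SPEC =====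
def Spec_find_weakly_connected_components (graph : List (Int × List Int)) (n : Int) (out : Int) : Prop := out = find_weakly_connected_components_alt graph n
instance (graph : List (Int × List Int)) (n : Int) (out : Int) : Decidable (Spec_find_weakly_connected_components graph n out) := by unfold Spec_find_weakly_connected_components; infer_instance

-- ===== CLAIM (what is proved, stated in full; the proofs are below) =====
def Claim_equal_find_weakly_connected_components : Prop := ∀ (graph : List (Int × List Int)) (n : Int), Dom_find_weakly_connected_components graph n → Spec_find_weakly_connected_components graph n (find_weakly_connected_components graph n)

-- ===== LEMMAS AND PROOFS =====

-- the symmetrised edge relation, its reachability closure, and node inventories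
def pvAdj (E : List (Int × Int)) (x y : Int) : Prop := (x, y) ∈ E ∨ (y, x) ∈ E
def pvConn (E : List (Int × Int)) : Int → Int → Prop := Relation.ReflTransGen (pvAdj E)
def pvEnds (E : List (Int × Int)) : List Int := E.flatMap (fun e => [e.1, e.2])
def pvFlat (gl : List (Int × List Int)) : List Int := gl.flatMap (fun p => p.1 :: p.2)

theorem mem_pvEdges {gl : List (Int × List Int)} {a b : Int} :
    (a, b) ∈ pvEdges gl ↔ ∃ p ∈ gl, a = p.1 ∧ b ∈ p.2 := by
  simp only [pvEdges, List.mem_flatMap, List.mem_map]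
  constructor
  · rintro ⟨p, hp, v, hv, heq⟩
    obtain ⟨h1, h2⟩ := Prod.mk.injEq .. ▸ heq
    exact ⟨p, hp, h1.symm, h2 ▸ hv⟩
  · rintro ⟨p, hp, ha, hb⟩
    exact ⟨p, hp, b, hb, by rw [ha]⟩

theorem pvEdges_mem_flat {gl : List (Int × List Int)} {a b : Int} (h : (a, b) ∈ pvEdges gl) :
    a ∈ pvFlat gl ∧ b ∈ pvFlat gl := by
  rcases mem_pvEdges.1 h with ⟨p, hp, ha, hb⟩
  refine ⟨?_, ?_⟩ <;> simp only [pvFlat, List.mem_flatMap]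
  · exact ⟨p, hp, by simp [ha]⟩
  · exact ⟨p, hp, by simp [Or.inr hb]⟩

theorem pvAdj_mem_flat {gl : List (Int × List Int)} {x y : Int}
    (h : pvAdj (pvEdges gl) x y) : y ∈ pvFlat gl :=
  h.elim (fun h => (pvEdges_mem_flat h).2) (fun h => (pvEdges_mem_flat h).1)

-- characterisation of the adjacency dict built by convert_to_undirected
theorem pvAddEdge_mem (d : PySem.Dict Int (PySem.Set Int)) (u v x y : Int) :
    (y ∈ PySem.Dict.getD (pvAddEdge d u v) x PySem.Set.empty) ↔
      (y ∈ PySem.Dict.getD d x PySem.Set.empty ∨ (x = u ∧ y = v) ∨ (x = v ∧ y = u)) := by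
  unfold pvAddEdge
  by_cases hxv : x = v <;> by_cases hvu : v = u <;> by_cases hxu : x = u <;>
    simp [PySem.Dict.getD_insert, PySem.Set.mem_add, hxv, hvu, hxu] <;>
    first
      | tauto
      | (exfalso; omega)
      | (rw [if_neg (Ne.symm hvu)]; simp [PySem.Set.mem_add]; tauto)

theorem pvRow_mem (u : Int) (vs : List Int) :
    ∀ (d : PySem.Dict Int (PySem.Set Int)) (x y : Int),
      (y ∈ PySem.Dict.getD (vs.foldl (fun d nb => pvAddEdge d u nb) d) x PySem.Set.empty) ↔
      (y ∈ PySem.Dict.getD d x PySem.Set.empty ∨ (x = u ∧ y ∈ vs) ∨ (y = u ∧ x ∈ vs)) := by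
  induction vs with
  | nil => intro d x y; simp
  | cons v vs ih =>
    intro d x y
    rw [List.foldl_cons, ih, pvAddEdge_mem]
    simp only [List.mem_cons]
    tauto

theorem pvConvert_go (gl : List (Int × List Int)) :
    ∀ (d : PySem.Dict Int (PySem.Set Int)) (x y : Int),
      (y ∈ PySem.Dict.getD (gl.foldl (fun d p => p.2.foldl (fun d nb => pvAddEdge d p.1 nb) d) d) x PySem.Set.empty) ↔
      (y ∈ PySem.Dict.getD d x PySem.Set.empty ∨ pvAdj (pvEdges gl) x y) := by
  induction gl with
  | nil => intro d x y; simp [pvAdj, pvEdges]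
  | cons p gl ih =>
    intro d x y
    rw [List.foldl_cons, ih, pvRow_mem]
    have hcons : ∀ a b : Int, (a, b) ∈ pvEdges (p :: gl) ↔
        ((a = p.1 ∧ b ∈ p.2) ∨ (a, b) ∈ pvEdges gl) := by
      intro a b
      simp only [pvEdges, List.flatMap_cons, List.mem_append, List.mem_map]
      constructor
      · rintro (⟨w, hw, heq⟩ | h)
        · obtain ⟨h1, h2⟩ := Prod.mk.injEq .. ▸ heq
          exact Or.inl ⟨h1.symm, h2 ▸ hw⟩
        · exact Or.inr h
      · rintro (⟨ha, hb⟩ | h)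
        · exact Or.inl ⟨b, hb, by rw [ha]⟩
        · exact Or.inr h
    simp only [pvAdj, hcons]
    tauto

theorem pvConvert_mem (gl : List (Int × List Int)) (x y : Int) :
    (y ∈ PySem.Dict.getD (pvConvert gl) x PySem.Set.empty) ↔ pvAdj (pvEdges gl) x y := by
  rw [pvConvert, pvConvert_go]
  simp

-- ---------- A side: the BFS loop ----------

-- hash-set bridges and the BFS termination measure
theorem pvHMemInsert (V : Std.HashSet Int) (a x : Int) : x ∈ V.insert a ↔ x = a ∨ x ∈ V := by
  rw [Std.HashSet.mem_insert]
  simp only [beq_iff_eq]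
  constructor <;> (rintro (rfl | h); exacts [Or.inl rfl, Or.inr h])

theorem pvHMemFoldlInsert (l : List Int) :
    ∀ (v : Std.HashSet Int) (x : Int),
      x ∈ l.foldl (fun v y => v.insert y) v ↔ x ∈ v ∨ x ∈ l := by
  induction l with
  | nil => intro v x; simp
  | cons a l ih =>
    intro v x
    rw [List.foldl_cons, ih, pvHMemInsert]
    simp only [List.mem_cons]
    tauto

def pvMiss (flat : List Int) (V : Std.HashSet Int) : Nat :=
  (flat.toFinset.filter (fun x => V.contains x = false)).card

theorem pvMiss_le (flat : List Int) (V : Std.HashSet Int) : pvMiss flat V ≤ flat.length :=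
  le_trans (Finset.card_filter_le _ _) flat.toFinset_card_le

theorem pvMiss_insert {flat : List Int} {V : Std.HashSet Int} {a : Int}
    (haf : a ∈ flat) (ha : a ∉ V) : pvMiss flat (V.insert a) + 1 = pvMiss flat V := by
  have hmem : a ∈ flat.toFinset.filter (fun x => V.contains x = false) := by
    simp [List.mem_toFinset, haf, Std.HashSet.contains_eq_false_iff_not_mem, ha]
  have hset : flat.toFinset.filter (fun x => (V.insert a).contains x = false)
      = (flat.toFinset.filter (fun x => V.contains x = false)).erase a := by
    ext x
    simp only [Finset.mem_filter, Finset.mem_erase, Std.HashSet.contains_insert,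
      Bool.or_eq_false_iff, beq_eq_false_iff_ne]
    constructor
    · rintro ⟨hf, hax, hc⟩
      exact ⟨fun h => hax h.symm, hf, hc⟩
    · rintro ⟨hxa, hf, hc⟩
      exact ⟨hf, fun h => hxa h.symm, hc⟩
  unfold pvMiss
  rw [hset, Finset.card_erase_of_mem hmem]
  have hpos := Finset.card_pos.2 ⟨a, hmem⟩
  omega

theorem pvNodupAppendOne {c : List Int} {a : Int} (hN : c.Nodup) (ha : a ∉ c) :
    (c ++ [a]).Nodup := by
  simp [List.nodup_append, hN]
  intro b hb heq
  exact ha (heq ▸ hb)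

-- inner for-loop of bfs
theorem bfs_fold_spec (flat : List Int) (L : List Int) :
    ∀ (V : Std.HashSet Int) (q : List Int), (∀ nb ∈ L, nb ∈ flat) →
      (let r := L.foldl (fun (st : Std.HashSet Int × List Int) nb =>
          if st.1.contains nb then st else (st.1.insert nb, st.2 ++ [nb])) (V, q);
       (∀ x, x ∈ r.1 ↔ x ∈ V ∨ x ∈ L) ∧ (∀ x ∈ r.2, x ∈ q ∨ x ∈ L) ∧
       (∀ x ∈ q, x ∈ r.2) ∧ (∀ x, x ∈ r.1 → x ∈ V ∨ x ∈ r.2) ∧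
       pvMiss flat r.1 + r.2.length = pvMiss flat V + q.length) := by
  induction L with
  | nil =>
    intro V q _
    exact ⟨by simp, by simp, by simp, fun x hx => Or.inl hx, rfl⟩
  | cons a L ih =>
    intro V q hf
    rw [List.foldl_cons]
    by_cases ha : a ∈ V
    · rw [if_pos (Std.HashSet.contains_iff_mem.2 ha)]
      obtain ⟨h2, h3, h4, h5, h6⟩ := ih V q (fun nb h => hf nb (List.mem_cons_of_mem _ h))
      refine ⟨fun x => ?_, fun x hx => ?_, h4, h5, h6⟩
      · rw [h2 x]; simp only [List.mem_cons]
        constructor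
        · rintro (h | h); exacts [Or.inl h, Or.inr (Or.inr h)]
        · rintro (h | rfl | h); exacts [Or.inl h, Or.inl ha, Or.inr h]
      · rcases h3 x hx with h | h; exacts [Or.inl h, Or.inr (List.mem_cons_of_mem _ h)]
    · rw [if_neg (by simpa [Std.HashSet.contains_iff_mem] using ha)]
      obtain ⟨h2, h3, h4, h5, h6⟩ := ih (V.insert a) (q ++ [a])
        (fun nb h => hf nb (List.mem_cons_of_mem _ h))
      have haf : a ∈ flat := hf a List.mem_cons_self
      have hcard := pvMiss_insert haf ha
      refine ⟨fun x => ?_, fun x hx => ?_, fun x hx => h4 x (List.mem_append_left _ hx),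
        fun x hx => ?_, ?_⟩
      · rw [h2 x, pvHMemInsert]; simp only [List.mem_cons]; tauto
      · rcases h3 x hx with h | h
        · rcases List.mem_append.1 h with h | h
          · exact Or.inl h
          · exact Or.inr (by simp at h; simp [h])
        · exact Or.inr (List.mem_cons_of_mem _ h)
      · rcases h5 x hx with h | h
        · rcases (pvHMemInsert V a x).1 h with h | h
          · exact Or.inr (h ▸ h4 a (List.mem_append_right _ (by simp)))
          · exact Or.inl h
        · exact Or.inr h
      · rw [h6, List.length_append]
        simp only [List.length_singleton]
        omega

-- the BFS loop: invariants and final characterisation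
theorem bfs_spec (g : PySem.Dict Int (PySem.Set Int)) (flat : List Int)
    (hgf : ∀ x y : Int, y ∈ PySem.Dict.getD g x PySem.Set.empty → y ∈ flat) :
    ∀ (f : Nat) (q : List Int) (V : Std.HashSet Int),
      (∀ x ∈ q, x ∈ V) →
      (∀ x ∈ V, x ∈ q ∨ ∀ y, y ∈ PySem.Dict.getD g x PySem.Set.empty → y ∈ V) →
      pvMiss flat V + q.length ≤ f →
      (let R := pvBfs g f q V;
       (∀ x ∈ V, x ∈ R) ∧
       (∀ x ∈ R, x ∈ V ∨ ∃ z ∈ q, Relation.ReflTransGen (fun a b => b ∈ PySem.Dict.getD g a PySem.Set.empty) z x) ∧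
       (∀ x ∈ R, ∀ y, y ∈ PySem.Dict.getD g x PySem.Set.empty → y ∈ R)) := by
  intro f
  induction f with
  | zero =>
    intro q V hq hinv hm
    cases q with
    | nil =>
      exact ⟨fun x h => h, fun x h => Or.inl h,
        fun x hx y hy => (hinv x hx).elim (by simp) (fun h => h y hy)⟩
    | cons a q => simp at hm
  | succ f ih =>
    intro q V hq hinv hm
    cases q with
    | nil =>
      exact ⟨fun x h => h, fun x h => Or.inl h,
        fun x hx y hy => (hinv x hx).elim (by simp) (fun h => h y hy)⟩
    | cons node q =>
      simp only [pvBfs]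
      obtain ⟨h2, h3, h4, h5, h6⟩ :=
        bfs_fold_spec flat (PySem.Dict.getD g node PySem.Set.empty) V q
          (fun nb h => hgf node nb h)
      generalize hfold : List.foldl
          (fun (st : Std.HashSet Int × List Int) nb =>
            if st.1.contains nb then st else (st.1.insert nb, st.2 ++ [nb]))
          (V, q) (PySem.Dict.getD g node PySem.Set.empty) = r at h2 h3 h4 h5 h6 ⊢
      simp only [List.length_cons] at hm
      obtain ⟨R2, R3, R4⟩ := ih r.2 r.1
        (fun x hx => (h3 x hx).elim (fun h => (h2 x).2 (Or.inl (hq x (List.mem_cons_of_mem _ h))))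
          (fun h => (h2 x).2 (Or.inr h)))
        (by
          intro x hx
          by_cases hxn : x = node
          · exact Or.inr (fun y hy => (h2 y).2 (Or.inr (hxn ▸ hy)))
          · rcases h5 x hx with hxV | hxq
            · rcases hinv x hxV with hxq0 | hcl
              · rcases List.mem_cons.1 hxq0 with h | h
                · exact absurd h hxn
                · exact Or.inl (h4 x h)
              · exact Or.inr (fun y hy => (h2 y).2 (Or.inl (hcl y hy)))
            · exact Or.inl hxq)
        (by omega)
      refine ⟨fun x hx => R2 x ((h2 x).2 (Or.inl hx)), fun x hx => ?_, R4⟩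
      rcases R3 x hx with hx1 | ⟨z, hz, hreach⟩
      · rcases (h2 x).1 hx1 with h | h
        · exact Or.inl h
        · exact Or.inr ⟨node, List.mem_cons_self, Relation.ReflTransGen.single h⟩
      · rcases h3 z hz with h | h
        · exact Or.inr ⟨z, List.mem_cons_of_mem _ h, hreach⟩
        · exact Or.inr ⟨node, List.mem_cons_self,
            Relation.ReflTransGen.trans (Relation.ReflTransGen.single h) hreach⟩

-- one call of bfs from an unvisited start on a closed visited set
theorem bfs_run (gl : List (Int × List Int)) (V : Std.HashSet Int) (i : Int)
    (hcl : ∀ x ∈ V, ∀ y, y ∈ PySem.Dict.getD (pvConvert gl) x PySem.Set.empty → y ∈ V) :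
    (let R := pvBfs (pvConvert gl) (pvFuelA gl) [i] (V.insert i);
     (∀ x, (x ∈ R) ↔ (x ∈ V ∨ pvConn (pvEdges gl) i x)) ∧
     (∀ x ∈ R, ∀ y, y ∈ PySem.Dict.getD (pvConvert gl) x PySem.Set.empty → y ∈ R)) := by
  have hgf : ∀ x y : Int, y ∈ PySem.Dict.getD (pvConvert gl) x PySem.Set.empty → y ∈ pvFlat gl :=
    fun x y h => pvAdj_mem_flat ((pvConvert_mem gl x y).1 h)
  have hmemadd : ∀ x, x ∈ V.insert i ↔ x ∈ V ∨ x = i := by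
    intro x
    rw [pvHMemInsert]
    tauto
  have hm : pvMiss (pvFlat gl) (V.insert i) + 1 ≤ pvFuelA gl := by
    have h2 := pvMiss_le (pvFlat gl) (V.insert i)
    unfold pvFuelA pvFlat at *
    omega
  obtain ⟨R2, R3, R4⟩ := bfs_spec (pvConvert gl) (pvFlat gl) hgf (pvFuelA gl) [i]
    (V.insert i)
    (by intro x hx; rw [List.mem_singleton] at hx; exact (hmemadd x).2 (Or.inr hx))
    (by
      intro x hx
      rcases (hmemadd x).1 hx with h | h
      · exact Or.inr (fun y hy => (hmemadd y).2 (Or.inl (hcl x h y hy)))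
      · exact Or.inl (by simp [h]))
    hm
  refine ⟨fun x => ⟨fun hx => ?_, fun hx => ?_⟩, R4⟩
  · rcases R3 x hx with h | ⟨z, hz, hreach⟩
    · rcases (hmemadd x).1 h with h | h
      · exact Or.inl h
      · exact Or.inr (h ▸ Relation.ReflTransGen.refl)
    · rw [List.mem_singleton] at hz
      subst hz
      refine Or.inr (Relation.ReflTransGen.mono ?_ hreach)
      intro a b hab
      exact (pvConvert_mem gl a b).1 hab
  · rcases hx with h | h
    · exact R2 x ((hmemadd x).2 (Or.inl h))
    · induction h with
      | refl => exact R2 i ((hmemadd i).2 (Or.inr rfl))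
      | tail hab hlast ihc => exact R4 _ ihc _ ((pvConvert_mem gl _ _).2 hlast)

-- ---------- B side: the saturation loop ----------

theorem pvEnds_length (E : List (Int × Int)) : (pvEnds E).length = 2 * E.length := by
  induction E with
  | nil => rfl
  | cons e E ih => simp [pvEnds] at ih ⊢; omega

theorem mem_pvEnds {E : List (Int × Int)} {x : Int} :
    x ∈ pvEnds E ↔ ∃ e ∈ E, x = e.1 ∨ x = e.2 := by
  simp [pvEnds, List.mem_flatMap]

-- one pass of the edge loop
theorem pass_go (E : List (Int × Int)) (s : Int) (l : List (Int × Int)) :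
    ∀ (c : PySem.Set Int) (ch0 : Bool),
      (∀ e ∈ l, e ∈ E) → c.Nodup → (∀ x ∈ c, pvConn E s x) →
      (let r := l.foldl (fun (st : PySem.Set Int × Bool) e =>
          if PySem.Set.contains st.1 e.1 && !PySem.Set.contains st.1 e.2 then
            (PySem.Set.add st.1 e.2, true)
          else if PySem.Set.contains st.1 e.2 && !PySem.Set.contains st.1 e.1 then
            (PySem.Set.add st.1 e.1, true)
          else st) (c, ch0);
       r.1.Nodup ∧ (∀ x ∈ c, x ∈ r.1) ∧ (∀ x ∈ r.1, pvConn E s x) ∧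
       (∀ x ∈ r.1, x ∈ c ∨ x ∈ pvEnds E) ∧ c.length ≤ r.1.length ∧
       (r.2 = false → ch0 = false ∧ r.1 = c ∧ ∀ e ∈ l, (e.1 ∈ c → e.2 ∈ c) ∧ (e.2 ∈ c → e.1 ∈ c)) ∧
       (r.2 = true → ch0 = true ∨ c.length < r.1.length)) := by
  induction l with
  | nil =>
    intro c ch0 _ hN hconn
    exact ⟨hN, fun x hx => hx, hconn, fun x hx => Or.inl hx, le_refl _,
      fun h => ⟨h, rfl, by simp⟩, fun h => Or.inl h⟩
  | cons e l ih =>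
    intro c ch0 hsub hN hconn
    rw [List.foldl_cons]
    have heE : e ∈ E := hsub e List.mem_cons_self
    have hsub' : ∀ e' ∈ l, e' ∈ E := fun e' h => hsub e' (List.mem_cons_of_mem _ h)
    by_cases h1 : e.1 ∈ c <;> by_cases h2 : e.2 ∈ c
    · -- both in: third branch
      rw [if_neg (by simp [PySem.Set.contains_iff, h1, h2]),
        if_neg (by simp [PySem.Set.contains_iff, h1, h2])]
      obtain ⟨g1, g2, g3, g4, g5, g6, g7⟩ := ih c ch0 hsub' hN hconn
      exact ⟨g1, g2, g3, g4, g5,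
        fun h => ⟨(g6 h).1, (g6 h).2.1, fun e' he' =>
          (List.mem_cons.1 he').elim (fun hh => hh ▸ ⟨fun _ => h2, fun _ => h1⟩)
            (fun hh => (g6 h).2.2 e' hh)⟩, g7⟩
    · -- e.1 in, e.2 not: add e.2
      rw [if_pos (by simp [PySem.Set.contains_iff, h1, h2])]
      rw [PySem.Set.add_of_not_mem h2]
      have hN2 : (c ++ [e.2]).Nodup := pvNodupAppendOne hN h2
      have hconn2 : ∀ x ∈ c ++ [e.2], pvConn E s x := by
        intro x hx
        rcases List.mem_append.1 hx with h | h
        · exact hconn x h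
        · rw [List.mem_singleton] at h
          subst h
          exact Relation.ReflTransGen.tail (hconn e.1 h1) (Or.inl heE)
      obtain ⟨g1, g2, g3, g4, g5, g6, g7⟩ := ih (c ++ [e.2]) true hsub' hN2 hconn2
      refine ⟨g1, fun x hx => g2 x (List.mem_append_left _ hx), g3, fun x hx => ?_, ?_, ?_, ?_⟩
      · rcases g4 x hx with h | h
        · rcases List.mem_append.1 h with h | h
          · exact Or.inl h
          · rw [List.mem_singleton] at h
            exact Or.inr (mem_pvEnds.2 ⟨e, heE, Or.inr h⟩)
        · exact Or.inr h
      · have := g5; simp at this ⊢; omega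
      · intro h; exact absurd (g6 h).1 (by simp)
      · intro _
        have h5 := g5
        simp only [List.length_append, List.length_singleton] at h5
        exact Or.inr (by omega)
    · -- e.2 in, e.1 not: add e.1
      rw [if_neg (by simp [PySem.Set.contains_iff, h1, h2]),
        if_pos (by simp [PySem.Set.contains_iff, h1, h2])]
      rw [PySem.Set.add_of_not_mem h1]
      have hN2 : (c ++ [e.1]).Nodup := pvNodupAppendOne hN h1
      have hconn2 : ∀ x ∈ c ++ [e.1], pvConn E s x := by
        intro x hx
        rcases List.mem_append.1 hx with h | h
        · exact hconn x h
        · rw [List.mem_singleton] at h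
          subst h
          exact Relation.ReflTransGen.tail (hconn e.2 h2) (Or.inr heE)
      obtain ⟨g1, g2, g3, g4, g5, g6, g7⟩ := ih (c ++ [e.1]) true hsub' hN2 hconn2
      refine ⟨g1, fun x hx => g2 x (List.mem_append_left _ hx), g3, fun x hx => ?_, ?_, ?_, ?_⟩
      · rcases g4 x hx with h | h
        · rcases List.mem_append.1 h with h | h
          · exact Or.inl h
          · rw [List.mem_singleton] at h
            exact Or.inr (mem_pvEnds.2 ⟨e, heE, Or.inl h⟩)
        · exact Or.inr h
      · have := g5; simp at this ⊢; omega
      · intro h; exact absurd (g6 h).1 (by simp)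
      · intro _
        have h5 := g5
        simp only [List.length_append, List.length_singleton] at h5
        exact Or.inr (by omega)
    · -- neither in: third branch
      rw [if_neg (by simp [PySem.Set.contains_iff, h1, h2]),
        if_neg (by simp [PySem.Set.contains_iff, h1, h2])]
      obtain ⟨g1, g2, g3, g4, g5, g6, g7⟩ := ih c ch0 hsub' hN hconn
      exact ⟨g1, g2, g3, g4, g5,
        fun h => ⟨(g6 h).1, (g6 h).2.1, fun e' he' =>
          (List.mem_cons.1 he').elim (fun hh => hh ▸ ⟨fun hh2 => absurd hh2 h1, fun hh2 => absurd hh2 h2⟩)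
            (fun hh => (g6 h).2.2 e' hh)⟩, g7⟩

theorem sat_spec (E : List (Int × Int)) (s : Int) :
    ∀ (f : Nat) (c : PySem.Set Int), c.Nodup → (∀ x ∈ c, x ∈ s :: pvEnds E) →
      (∀ x ∈ c, pvConn E s x) → (s :: pvEnds E).toFinset.card + 1 ≤ f + c.length →
      (let R := pvSat E f c;
       (∀ x ∈ c, x ∈ R) ∧ (∀ x ∈ R, pvConn E s x) ∧
       ∀ e ∈ E, (e.1 ∈ R → e.2 ∈ R) ∧ (e.2 ∈ R → e.1 ∈ R)) := by
  intro f
  induction f with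
  | zero =>
    intro c hN hsub hconn hm
    exfalso
    have h1 : c.length = c.toFinset.card := (List.toFinset_card_of_nodup hN).symm
    have h2 : c.toFinset.card ≤ (s :: pvEnds E).toFinset.card :=
      Finset.card_le_card (fun x hx => List.mem_toFinset.2 (hsub x (List.mem_toFinset.1 hx)))
    omega
  | succ f ih =>
    intro c hN hsub hconn hm
    show _ ∧ _ ∧ _
    rw [pvSat]
    obtain ⟨g1, g2, g3, g4, g5, g6, g7⟩ := pass_go E s E c false (fun e h => h) hN hconn
    set r := pvPass E c with hrdef
    have hrfold : r = E.foldl (fun (st : PySem.Set Int × Bool) e =>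
        if PySem.Set.contains st.1 e.1 && !PySem.Set.contains st.1 e.2 then
          (PySem.Set.add st.1 e.2, true)
        else if PySem.Set.contains st.1 e.2 && !PySem.Set.contains st.1 e.1 then
          (PySem.Set.add st.1 e.1, true)
        else st) (c, false) := rfl
    rw [← hrfold] at g1 g2 g3 g4 g5 g6 g7
    by_cases hch : r.2 = true
    · rw [if_pos hch]
      have hstrict : c.length < r.1.length := (g7 hch).elim (fun h => by simp at h) id
      obtain ⟨R1, R2, R3⟩ := ih r.1 g1
        (fun x hx => (g4 x hx).elim (fun h => hsub x h) (fun h => List.mem_cons_of_mem _ h))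
        g3 (by omega)
      exact ⟨fun x hx => R1 x (g2 x hx), R2, R3⟩
    · rw [if_neg hch]
      rw [Bool.not_eq_true] at hch
      obtain ⟨-, hEq, hclosed⟩ := g6 hch
      rw [hEq]
      exact ⟨fun x hx => hx, hconn, hclosed⟩

theorem sat_run (gl : List (Int × List Int)) (i : Int) :
    ∀ x, (x ∈ pvSat (pvEdges gl) (2 * (pvEdges gl).length + 2) (PySem.Set.add PySem.Set.empty i)) ↔
      pvConn (pvEdges gl) i x := by
  intro x
  have hseed : PySem.Set.add PySem.Set.empty i = [i] := rfl
  have hm : ((i :: pvEnds (pvEdges gl)).toFinset.card + 1 ≤ (2 * (pvEdges gl).length + 2) + 1) := by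
    have h1 : (i :: pvEnds (pvEdges gl)).toFinset.card ≤ (i :: pvEnds (pvEdges gl)).length :=
      (i :: pvEnds (pvEdges gl)).toFinset_card_le
    have h2 := pvEnds_length (pvEdges gl)
    simp only [List.length_cons] at h1
    omega
  obtain ⟨R1, R2, R3⟩ := sat_spec (pvEdges gl) i (2 * (pvEdges gl).length + 2) [i]
    (List.nodup_singleton i)
    (by intro y hy; rw [List.mem_singleton] at hy; exact hy ▸ List.mem_cons_self)
    (by intro y hy; rw [List.mem_singleton] at hy; exact hy ▸ Relation.ReflTransGen.refl)
    (by simpa using hm)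
  rw [hseed]
  constructor
  · exact fun hx => R2 x hx
  · intro hconn
    induction hconn with
    | refl => exact R1 i (by simp)
    | tail hab hlast ihc =>
      rcases hlast with h | h
      · exact (R3 _ h).1 ihc
      · exact (R3 _ h).2 ihc

-- ---------- the shared outer counting loop ----------

theorem outer_loop (gl : List (Int × List Int)) (xs : List Int) :
    ∀ (VA VB : Std.HashSet Int) (k : Int),
      (∀ x, (x ∈ VA) ↔ (x ∈ VB)) →
      (∀ x ∈ VA, ∀ y, y ∈ PySem.Dict.getD (pvConvert gl) x PySem.Set.empty → y ∈ VA) →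
      (xs.foldl (fun (st : Std.HashSet Int × Int) node =>
          if st.1.contains node then st
          else (pvBfs (pvConvert gl) (pvFuelA gl) [node] (st.1.insert node), st.2 + 1))
        (VA, k)).2
      = (xs.foldl (fun (st : Std.HashSet Int × Int) i =>
          if st.1.contains i then st
          else ((pvSat (pvEdges gl) (2 * (pvEdges gl).length + 2)
              (PySem.Set.add PySem.Set.empty i)).foldl (fun v x => v.insert x) st.1,
            st.2 + 1)) (VB, k)).2 := by
  induction xs with
  | nil => intro VA VB k _ _; rfl
  | cons i xs ih =>
    intro VA VB k hmem hcl
    rw [List.foldl_cons, List.foldl_cons]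
    by_cases hi : i ∈ VA
    · rw [if_pos (Std.HashSet.contains_iff_mem.2 hi),
        if_pos (Std.HashSet.contains_iff_mem.2 ((hmem i).1 hi))]
      exact ih VA VB k hmem hcl
    · rw [if_neg (by simpa [Std.HashSet.contains_iff_mem] using hi),
        if_neg (by simpa [Std.HashSet.contains_iff_mem] using (fun h => hi ((hmem i).2 h)))]
      obtain ⟨R2, R3⟩ := bfs_run gl VA i hcl
      refine ih _ _ (k + 1) (fun x => ?_) R3
      rw [R2 x, pvHMemFoldlInsert, sat_run gl i, hmem x]

-- ===== VERDICT (by name: the statement is the Claim_ definition above) =====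
theorem find_weakly_connected_components_spec : Claim_equal_find_weakly_connected_components := by
  intro graph n _
  show find_weakly_connected_components graph n = find_weakly_connected_components_alt graph n
  unfold find_weakly_connected_components find_weakly_connected_components_alt
  exact outer_loop ((PySem.Dict.ofList graph).items) (PySem.List.pyRange 1 (n + 1) 1)
    ∅ ∅ 0 (fun _ => Iff.rfl) (by intro x hx; simp at hx)
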